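-- pv_equiv track=rewrite | github.com/ericaloha/Sketcher-toolkit | Sketcher/extraction/extractor/ExtracePatterns.py | CalDist
-- ===== SOURCE A (Python) =====
-- def CalDist(last_file_path, file_id, a):
--     lasts = last_file_path.split(":")
--     now = file_id.split(":")
--     if lasts[-1].find('/') != -1:
--         lasts.append(-1)
--     elif now[-1].find('/') != -1:
--         now.append(-1)
--     if len(lasts) != len(now):
--         if len(lasts) > len(now):
--             i = 0
--             while i < len(lasts) - len(now):
--                 now.append("0")
--         elif len(lasts) < len(now):
--             i = 0
--             while i < len(now) - len(lasts):
--                 lasts.append("0")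
--     i = 0
--     dif = []
--     while i < len(lasts):
--         if lasts[i] != now[i]:
--             dif.append(1)
--         i += 1
--     index = 0
--     cnt = len(dif)
--     weight = 0
--     while index < cnt:
--         weight += pow(a, index)
--         index += 1
--     return weight
-- ===== SOURCE B (Python) =====
-- def CalDist(last_file_path, file_id, a):
--     lasts = last_file_path.split(":")
--     now = file_id.split(":")
--     if '/' in lasts[-1]:
--         lasts = lasts + [-1]
--     elif '/' in now[-1]:
--         now = now + [-1]
--     # One fused pass: pull from both sequences together (missing side reads as "0");
--     # the weight is accumulated on the fly Horner-style (power *= a per mismatch),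
--     # so no padded lists, no difference count and no pow() calls are ever built.
--     weight, power = 0, 1
--     it_x, it_y = iter(lasts), iter(now)
--     sentinel = object()
--     while True:
--         x, y = next(it_x, sentinel), next(it_y, sentinel)
--         if x is sentinel and y is sentinel:
--             return weight
--         if x is sentinel:
--             x = "0"
--         if y is sentinel:
--             y = "0"
--         if x != y:
--             weight += power
--             power *= a
-- ===== Notes on version B (the rewrite author's own statement) =====
-- stated objective: alternative
-- what changed: B replaces A's staged passes (pad the shorter split list with '0', then an indexed comparison loop building dif, then a pow-summing loop over its length) by one fused simultaneous traversal of both sequences that accumulates the weight on the fly with a running power (weight += power; power *= a on each mismatch), so no padded lists, no dif list and no pow() calls exist.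
import Mathlib
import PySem

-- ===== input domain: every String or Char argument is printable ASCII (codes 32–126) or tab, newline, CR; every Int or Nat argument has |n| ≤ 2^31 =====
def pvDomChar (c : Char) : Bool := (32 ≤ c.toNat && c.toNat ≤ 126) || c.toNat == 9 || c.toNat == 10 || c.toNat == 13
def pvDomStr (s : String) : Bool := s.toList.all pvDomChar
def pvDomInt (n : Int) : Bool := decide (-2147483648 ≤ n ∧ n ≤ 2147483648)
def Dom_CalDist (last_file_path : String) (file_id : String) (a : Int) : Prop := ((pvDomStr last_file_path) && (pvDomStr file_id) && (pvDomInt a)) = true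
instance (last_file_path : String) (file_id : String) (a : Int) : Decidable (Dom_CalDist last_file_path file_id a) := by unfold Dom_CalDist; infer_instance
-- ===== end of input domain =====

-- B fuses A's pad/compare/pow-sum stages into one simultaneous traversal keeping a
-- (weight, power) accumulator (objective: alternative); list elements are `Option String`
-- (`none` models the Python int -1 appended to a list of strings, unequal to every string).

-- ===== PORT A =====
-- A's `while i < len(lasts) - len(now): now.append("0")` (i is never incremented; the loop
-- stops because appending shrinks the difference): append `some "0"` until length = target.
def padA (target : Nat) (xs : List (Option String)) : List (Option String) :=
  if xs.length < target then padA target (xs ++ [some "0"]) else xs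
termination_by target - xs.length
decreasing_by simp; omega

def CalDist (last_file_path : String) (file_id : String) (a : Int) : Int :=
  let lastsS := (PySem.Str.split? last_file_path ":").getD []   -- sep ≠ "": never none
  let nowS := (PySem.Str.split? file_id ":").getD []
  let lasts : List (Option String) := lastsS.map some
  let now : List (Option String) := nowS.map some
  -- lasts[-1] / now[-1]: split(":") is never empty, so the `.getD ""` default is never used
  let p :=
    if PySem.Str.find ((PySem.List.pyGet? lastsS (-1)).getD "") "/" ≠ -1 then
      (lasts ++ [none], now)
    else if PySem.Str.find ((PySem.List.pyGet? nowS (-1)).getD "") "/" ≠ -1 then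
      (lasts, now ++ [none])
    else (lasts, now)
  let lasts := p.1
  let now := p.2
  let now := if lasts.length > now.length then padA lasts.length now else now
  let lasts := if lasts.length < now.length then padA now.length lasts else lasts
  let dif := (PySem.List.pyRange 0 lasts.length 1).foldl
    (fun dif i =>
      if PySem.List.pyGetD lasts i none ≠ PySem.List.pyGetD now i none then dif ++ [(1 : Int)]
      else dif) []
  let cnt := dif.length
  (PySem.List.pyRange 0 cnt 1).foldl (fun w index => w + a ^ index.toNat) 0

-- ===== PORT B =====
-- Source B's fused `while True` loop pulling one element from each iterator (defaulting to "0"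
-- when one side is exhausted) and maintaining (weight, power), as simultaneous recursion.
def goB (a : Int) : List (Option String) → List (Option String) → Int → Int → Int
  | [], [], w, _ => w
  | x :: xs, [], w, p =>
      if x ≠ some "0" then goB a xs [] (w + p) (p * a) else goB a xs [] w p
  | [], y :: ys, w, p =>
      if some "0" ≠ y then goB a [] ys (w + p) (p * a) else goB a [] ys w p
  | x :: xs, y :: ys, w, p =>
      if x ≠ y then goB a xs ys (w + p) (p * a) else goB a xs ys w p

def CalDist_alt (last_file_path : String) (file_id : String) (a : Int) : Int :=
  let lastsS := (PySem.Str.split? last_file_path ":").getD []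
  let nowS := (PySem.Str.split? file_id ":").getD []
  let lasts : List (Option String) := lastsS.map some
  let now : List (Option String) := nowS.map some
  let p :=
    if PySem.Str.isIn "/" ((PySem.List.pyGet? lastsS (-1)).getD "") = true then
      (lasts ++ [none], now)
    else if PySem.Str.isIn "/" ((PySem.List.pyGet? nowS (-1)).getD "") = true then
      (lasts, now ++ [none])
    else (lasts, now)
  goB a p.1 p.2 0 1

-- ===== PRECONDITION & SPEC =====
def Spec_CalDist (last_file_path : String) (file_id : String) (a : Int) (out : Int) : Prop := out = CalDist_alt last_file_path file_id a
instance (last_file_path : String) (file_id : String) (a : Int) (out : Int) : Decidable (Spec_CalDist last_file_path file_id a out) := by unfold Spec_CalDist; infer_instance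

-- ===== CLAIM (what is proved, stated in full; the proofs are below) =====
def Claim_equal_CalDist : Prop := ∀ (last_file_path : String) (file_id : String) (a : Int), Dom_CalDist last_file_path file_id a → Spec_CalDist last_file_path file_id a (CalDist last_file_path file_id a)

-- ===== LEMMAS AND PROOFS =====

-- geometric sum 1 + a + … + a^(n-1), front-recursive
def geom (a : Int) : Nat → Int
  | 0 => 0
  | n + 1 => 1 + a * geom a n

lemma geom_succ_right (a : Int) (n : Nat) : geom a (n + 1) = geom a n + a ^ n := by
  induction n with
  | zero => simp [geom]
  | succ n ih =>
    calc geom a (n + 2) = 1 + a * geom a (n + 1) := rfl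
    _ = 1 + a * (geom a n + a ^ n) := by rw [ih]
    _ = (1 + a * geom a n) + a ^ (n + 1) := by ring
    _ = geom a (n + 1) + a ^ (n + 1) := rfl

-- mismatch count with fill "0", mirroring goB's case split
def cntB : List (Option String) → List (Option String) → Nat
  | [], [] => 0
  | x :: xs, [] => (if x ≠ some "0" then 1 else 0) + cntB xs []
  | [], y :: ys => (if some "0" ≠ y then 1 else 0) + cntB [] ys
  | x :: xs, y :: ys => (if x ≠ y then 1 else 0) + cntB xs ys

lemma geom_one_add (a : Int) (n : Nat) : geom a (1 + n) = 1 + a * geom a n := by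
  rw [Nat.add_comm]; rfl

lemma goB_eq (a : Int) : ∀ (xs ys : List (Option String)) (w p : Int),
    goB a xs ys w p = w + p * geom a (cntB xs ys) := by
  intro xs
  induction xs with
  | nil =>
    intro ys
    induction ys with
    | nil => intro w p; simp [goB, cntB, geom]
    | cons y ys ih =>
      intro w p
      by_cases h : some "0" ≠ y
      · simp only [goB, cntB, if_pos h, ih, geom_one_add]; ring
      · simp only [goB, cntB, if_neg h, ih]; simp
  | cons x xs ihx =>
    intro ys
    cases ys with
    | nil =>
      intro w p
      by_cases h : x ≠ some "0"
      · simp only [goB, cntB, if_pos h, ihx, geom_one_add]; ring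
      · simp only [goB, cntB, if_neg h, ihx]; simp
    | cons y ys =>
      intro w p
      by_cases h : x ≠ y
      · simp only [goB, cntB, if_pos h, ihx, geom_one_add]; ring
      · simp only [goB, cntB, if_neg h, ihx]; simp

-- A's final while-loop: the pow-sum over range(cnt) is geom a cnt
lemma weightA_eq (a : Int) (c : Nat) :
    (PySem.List.pyRange 0 (c : Int) 1).foldl (fun w index => w + a ^ index.toNat) 0
      = geom a c := by
  induction c with
  | zero => simp [geom]
  | succ c ih =>
    have h : ((c : Int) + 1) = ((c + 1 : Nat) : Int) := by push_cast; ring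
    rw [← h, PySem.List.pyRange_one_succ_right (by positivity), List.foldl_append, ih,
        geom_succ_right]
    simp

lemma padA_eq (target : Nat) (xs : List (Option String)) :
    padA target xs = xs ++ List.replicate (target - xs.length) (some "0") := by
  fun_induction padA target xs with
  | case1 xs h ih =>
    rw [ih]
    have h2 : target - xs.length = (target - (xs ++ [some "0"]).length) + 1 := by
      simp; omega
    rw [h2, List.replicate_succ]
    simp
  | case2 xs h =>
    have h2 : target - xs.length = 0 := by omega
    simp [h2]

lemma length_padA (target : Nat) (xs : List (Option String)) :
    (padA target xs).length = max target xs.length := by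
  rw [padA_eq]; simp; omega

lemma foldl_append_one_length {α : Type} (l : List α) (p : α → Prop) [DecidablePred p]
    (acc : List Int) :
    (l.foldl (fun d x => if p x then d ++ [(1 : Int)] else d) acc).length
      = acc.length + l.countP (fun x => decide (p x)) := by
  induction l generalizing acc with
  | nil => simp
  | cons x xs ih =>
    simp only [List.foldl_cons, List.countP_cons]
    by_cases h : p x
    · simp [h, ih]; omega
    · simp [h, ih]

-- indexed mismatch count over equal-length lists = structural cntB
lemma countP_range_eq : ∀ (L N : List (Option String)), L.length = N.length →
    (List.range L.length).countP
      (fun k => decide (L.getD k none ≠ N.getD k none)) = cntB L N := by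
  intro L
  induction L with
  | nil =>
    intro N h
    have : N = [] := by cases N <;> simp_all
    subst this; simp [cntB]
  | cons x xs ih =>
    intro N h
    cases N with
    | nil => simp at h
    | cons y ys =>
      have h' : xs.length = ys.length := by simpa using h
      rw [List.length_cons, List.range_succ_eq_map, List.countP_cons, List.countP_map]
      have hp : ((fun k => decide ((x :: xs).getD k none ≠ (y :: ys).getD k none)) ∘ Nat.succ)
          = (fun k => decide (xs.getD k none ≠ ys.getD k none)) := by
        funext k; simp [Function.comp]
      rw [hp, ih ys h']
      simp only [List.getD_cons_zero, cntB]
      by_cases hxy : x = y <;> simp [hxy, Nat.add_comm]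

-- A's dif-building loop over the padded lists counts cntB of the padded lists
lemma difA_eq (L N : List (Option String)) (h : L.length = N.length) :
    ((PySem.List.pyRange 0 L.length 1).foldl
      (fun dif i =>
        if PySem.List.pyGetD L i none ≠ PySem.List.pyGetD N i none then dif ++ [(1 : Int)]
        else dif) []).length = cntB L N := by
  rw [foldl_append_one_length]
  simp only [List.length_nil, Nat.zero_add]
  rw [← countP_range_eq L N h]
  rw [PySem.List.pyRange_one]
  rw [List.countP_map]
  simp only [Int.sub_zero, Int.toNat_natCast]
  apply List.countP_congr
  intro k hk
  simp only [Function.comp, Int.zero_add]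
  rw [PySem.List.pyGetD_natCast, PySem.List.pyGetD_natCast]

-- padding the shorter right list with "0" keeps cntB
lemma cntB_fill_nil : ∀ (L : List (Option String)),
    cntB L (List.replicate L.length (some "0")) = cntB L [] := by
  intro L
  induction L with
  | nil => simp [cntB]
  | cons x xs ih => simp only [List.length_cons, List.replicate_succ, cntB, ih, ne_eq]

lemma cntB_pad_right : ∀ (N L : List (Option String)), N.length ≤ L.length →
    cntB L (N ++ List.replicate (L.length - N.length) (some "0")) = cntB L N := by
  intro N
  induction N with
  | nil =>
    intro L _
    simpa using cntB_fill_nil L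
  | cons y ys ih =>
    intro L h
    cases L with
    | nil => simp at h
    | cons x xs =>
      have h' : ys.length ≤ xs.length := by simpa using h
      simp only [List.cons_append, List.length_cons, cntB, ne_eq]
      rw [Nat.succ_sub_succ, ih xs h']

lemma cntB_fill_nil' : ∀ (N : List (Option String)),
    cntB (List.replicate N.length (some "0")) N = cntB [] N := by
  intro N
  induction N with
  | nil => simp [cntB]
  | cons y ys ih => simp only [List.length_cons, List.replicate_succ, cntB, ih, ne_eq]

lemma cntB_pad_left : ∀ (L N : List (Option String)), L.length ≤ N.length →
    cntB (L ++ List.replicate (N.length - L.length) (some "0")) N = cntB L N := by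
  intro L
  induction L with
  | nil =>
    intro N _
    simpa using cntB_fill_nil' N
  | cons x xs ih =>
    intro N h
    cases N with
    | nil => simp at h
    | cons y ys =>
      have h' : xs.length ≤ ys.length := by simpa using h
      simp only [List.cons_append, List.length_cons, cntB, ne_eq]
      rw [Nat.succ_sub_succ, ih ys h']

-- A's pad-then-count-then-pow-sum pipeline equals B's fused recursion, for any post-branch lists
lemma pipeline_eq (a : Int) (L N : List (Option String)) :
    (let now := if L.length > N.length then padA L.length N else N
     let lasts := if L.length < now.length then padA now.length L else L
     let dif := (PySem.List.pyRange 0 lasts.length 1).foldl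
       (fun dif i =>
         if PySem.List.pyGetD lasts i none ≠ PySem.List.pyGetD now i none then dif ++ [(1 : Int)]
         else dif) []
     (PySem.List.pyRange 0 dif.length 1).foldl (fun w index => w + a ^ index.toNat) 0)
    = goB a L N 0 1 := by
  rw [goB_eq]
  simp only []
  by_cases hgt : L.length > N.length
  · have hlenN' : (padA L.length N).length = L.length := by rw [length_padA]; omega
    rw [if_pos hgt, if_neg (by omega)]
    rw [difA_eq L (padA L.length N) (by omega), padA_eq]
    rw [cntB_pad_right N L (by omega), weightA_eq]
    ring
  · by_cases hlt : L.length < N.length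
    · have hlenL' : (padA N.length L).length = N.length := by rw [length_padA]; omega
      rw [if_neg hgt, if_pos hlt]
      rw [difA_eq (padA N.length L) N (by omega), padA_eq]
      rw [cntB_pad_left L N (by omega), weightA_eq]
      ring
    · rw [if_neg hgt, if_neg (by omega)]
      rw [difA_eq L N (by omega), weightA_eq]
      ring

-- ===== VERDICT (by name: the statement is the Claim_ definition above) =====
theorem CalDist_spec : Claim_equal_CalDist := by
  intro last_file_path file_id a _
  unfold Spec_CalDist CalDist CalDist_alt
  have hc : ∀ s : String, (PySem.Str.find s "/" ≠ -1) = (PySem.Str.isIn "/" s = true) := by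
    intro s
    rw [eq_iff_iff, PySem.Str.find_ne_neg_one_iff, PySem.Str.isIn_iff_infix]
  simp only [hc]
  set lastsS := (PySem.Str.split? last_file_path ":").getD []
  set nowS := (PySem.Str.split? file_id ":").getD []
  by_cases h1 : PySem.Str.isIn "/" ((PySem.List.pyGet? lastsS (-1)).getD "") = true
  · simp only [if_pos h1]
    exact pipeline_eq a (List.map some lastsS ++ [none]) (List.map some nowS)
  · simp only [if_neg h1]
    by_cases h2 : PySem.Str.isIn "/" ((PySem.List.pyGet? nowS (-1)).getD "") = true
    · simp only [if_pos h2]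
      exact pipeline_eq a (List.map some lastsS) (List.map some nowS ++ [none])
    · simp only [if_neg h2]
      exact pipeline_eq a (List.map some lastsS) (List.map some nowS)
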